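-- pv_equiv track=rewrite | github.com/pypi-data/pypi-mirror-103 | packages/iob2/iob2-1.1.1.tar.gz/iob2-1.1.1/iob2/__init__.py | listup_tag_name
-- ===== SOURCE A (Python) =====
-- def listup_tag_name(iob2_ls):
-- 	if type(iob2_ls) != type([]): raise Exception("[listup_tag_name() error] arg_corpusは2重のリストの形である必要があります")
-- 	# タグの列挙
-- 	tag_dic = {}
-- 	for rec in iob2_ls:
-- 		for _, tag in rec: tag_dic[tag] = 1
-- 	# I, Bタグの整合性の確認
-- 	i_dic = {tag[2:]:1 for tag in tag_dic
-- 		if tag[:2] == "I-"}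
-- 	b_dic = {tag[2:]:1 for tag in tag_dic
-- 		if tag[:2] == "B-"}
-- 	for i_tag in i_dic:
-- 		if i_tag not in b_dic: raise Exception("[listup_tag_name() error] I-tag, B-tagの名前に不整合が存在します")
-- 	return list(b_dic)
-- ===== SOURCE B (Python) =====
-- def listup_tag_name(iob2_ls):
-- 	if type(iob2_ls) != type([]): raise Exception("[listup_tag_name() error] arg_corpusは2重のリストの形である必要があります")
-- 	# single pass: build the I- and B- name dicts directly, no intermediate tag table
-- 	i_dic = {}
-- 	b_dic = {}
-- 	for rec in iob2_ls:
-- 		for _, tag in rec: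
-- 			if tag[:2] == "I-": i_dic[tag[2:]] = 1
-- 			elif tag[:2] == "B-": b_dic[tag[2:]] = 1
-- 	for i_tag in i_dic:
-- 		if i_tag not in b_dic: raise Exception("[listup_tag_name() error] I-tag, B-tagの名前に不整合が存在します")
-- 	return list(b_dic)
-- ===== Notes on version B (the rewrite author's own statement) =====
-- stated objective: simpler
-- what changed: Removed the intermediate tag_dic dedup table and the two dict comprehensions over it: one direct pass over the records fills i_dic and b_dic in first-appearance order; validation and return are unchanged.
import Mathlib
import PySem

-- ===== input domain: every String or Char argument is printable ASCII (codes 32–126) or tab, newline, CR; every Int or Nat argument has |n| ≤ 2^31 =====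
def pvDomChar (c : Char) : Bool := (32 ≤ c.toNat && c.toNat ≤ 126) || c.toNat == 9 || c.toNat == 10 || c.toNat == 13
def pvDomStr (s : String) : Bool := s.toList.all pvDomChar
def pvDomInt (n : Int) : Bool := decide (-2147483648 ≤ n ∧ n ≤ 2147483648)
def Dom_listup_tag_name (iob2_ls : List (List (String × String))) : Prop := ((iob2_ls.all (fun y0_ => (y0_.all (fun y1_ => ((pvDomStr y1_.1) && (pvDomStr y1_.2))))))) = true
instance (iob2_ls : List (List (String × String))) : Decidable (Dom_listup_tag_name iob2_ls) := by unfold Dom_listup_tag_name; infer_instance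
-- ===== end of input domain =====

-- B drops A's intermediate tag_dic dedup table and fills i_dic/b_dic in one direct pass (objective: simpler).

-- tag[:2] and tag[2:]
def pvTake2 (t : String) : String := PySem.Str.slice t none (some 2)
def pvDrop2 (t : String) : String := PySem.Str.slice t (some 2) none

-- ===== PORT A =====
-- The final validation loop raises exactly on inputs excluded by Pre_ below, so the port returns list(b_dic) directly.
def listup_tag_name (iob2_ls : List (List (String × String))) : List String :=
  ((iob2_ls.foldl (fun d rec => rec.foldl (fun d p => d.insert p.2 (1 : Int)) d)
      (PySem.Dict.empty : PySem.Dict String Int)).keys.foldl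
    (fun d tag => if pvTake2 tag = "B-" then d.insert (pvDrop2 tag) (1 : Int) else d)
    (PySem.Dict.empty : PySem.Dict String Int)).keys

-- ===== PORT B =====
-- One pass over all (word, tag) pairs maintaining the pair (i_dic, b_dic); the validation loop raises exactly
-- on inputs excluded by Pre_ below, so the port returns list(b_dic) directly.
def listup_tag_name_alt (iob2_ls : List (List (String × String))) : List String :=
  (iob2_ls.foldl
      (fun st rec => rec.foldl
        (fun st p =>
          if pvTake2 p.2 = "I-" then (st.1.insert (pvDrop2 p.2) (1 : Int), st.2)
          else if pvTake2 p.2 = "B-" then (st.1, st.2.insert (pvDrop2 p.2) (1 : Int))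
          else st)
        st)
      ((PySem.Dict.empty : PySem.Dict String Int), (PySem.Dict.empty : PySem.Dict String Int))).2.keys

-- ===== PRECONDITION & SPEC =====
-- All tags of the input, in order
def pvTags (iob2_ls : List (List (String × String))) : List String :=
  iob2_ls.flatMap (fun rec => rec.map (fun p => p.2))

-- Pre_ excludes exactly the inputs on which both Pythons raise the consistency Exception:
-- some tag starting "I-" whose name has no tag "B-"+name anywhere in the input.
def Pre_listup_tag_name (iob2_ls : List (List (String × String))) : Prop :=
  ∀ t ∈ pvTags iob2_ls, pvTake2 t = "I-" →
    ∃ u ∈ pvTags iob2_ls, pvTake2 u = "B-" ∧ pvDrop2 u = pvDrop2 t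
instance (iob2_ls : List (List (String × String))) : Decidable (Pre_listup_tag_name iob2_ls) := by
  unfold Pre_listup_tag_name; infer_instance

def pvWitness_listup_tag_name : (List (List (String × String))) :=
  [[("Alice", "B-PER"), ("Smith", "I-PER")], [("ran", "O")]]

def Spec_listup_tag_name (iob2_ls : List (List (String × String))) (out : List String) : Prop := out = listup_tag_name_alt iob2_ls
instance (iob2_ls : List (List (String × String))) (out : List String) : Decidable (Spec_listup_tag_name iob2_ls out) := by unfold Spec_listup_tag_name; infer_instance

-- ===== CLAIM (what is proved, stated in full; the proofs are below) =====
def Claim_equal_listup_tag_name : Prop := ∀ (iob2_ls : List (List (String × String))), Dom_listup_tag_name iob2_ls → Pre_listup_tag_name iob2_ls → Spec_listup_tag_name iob2_ls (listup_tag_name iob2_ls)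

-- ===== LEMMAS AND PROOFS =====

-- the second component of B's pair fold is the plain b_dic fold
theorem pv_snd_fold (l : List (String × String))
    (st : PySem.Dict String Int × PySem.Dict String Int) :
    (l.foldl
      (fun st p =>
        if pvTake2 p.2 = "I-" then (st.1.insert (pvDrop2 p.2) (1 : Int), st.2)
        else if pvTake2 p.2 = "B-" then (st.1, st.2.insert (pvDrop2 p.2) (1 : Int))
        else st)
      st).2
    = l.foldl
        (fun d p => if pvTake2 p.2 = "B-" then d.insert (pvDrop2 p.2) (1 : Int) else d)
        st.2 := by
  induction l generalizing st with
  | nil => rfl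
  | cons p l ih =>
    simp only [List.foldl_cons, ih]
    by_cases hI : pvTake2 p.2 = "I-"
    · simp [hI]
    · by_cases hB : pvTake2 p.2 = "B-" <;> simp [hI, hB]

-- deduplicating the tags before extracting the (filtered, mapped) names does not change the name set
theorem pv_ofList_filter_map_ofList (q : String → Bool) (f : String → String) (xs : List String) :
    PySem.Set.ofList (((PySem.Set.ofList xs).filter q).map f)
    = PySem.Set.ofList ((xs.filter q).map f) := by
  induction xs using List.reverseRecOn with
  | nil => rfl
  | append_singleton xs x ih =>
    by_cases hq : q x = true
    · have h1 : List.filter q [x] = [x] := by simp [hq]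
      by_cases hx : x ∈ PySem.Set.ofList xs
      · have hxf : f x ∈ PySem.Set.ofList ((xs.filter q).map f) := by
          rw [PySem.Set.mem_ofList]
          exact List.mem_map_of_mem (List.mem_filter.2 ⟨(PySem.Set.mem_ofList xs x).1 hx, hq⟩)
        rw [PySem.Set.ofList_append_singleton, PySem.Set.add_of_mem hx,
            List.filter_append, h1, List.map_append, List.map_singleton,
            PySem.Set.ofList_append_singleton, ih, PySem.Set.add_of_mem (ih ▸ hxf)]
      · rw [PySem.Set.ofList_append_singleton, PySem.Set.add_of_not_mem hx,
            List.filter_append, List.filter_append, h1, List.map_append, List.map_append,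
            List.map_singleton,
            PySem.Set.ofList_append_singleton, PySem.Set.ofList_append_singleton, ih]
    · have h1 : List.filter q [x] = [] := by simp [List.filter, hq]
      by_cases hx : x ∈ PySem.Set.ofList xs
      · rw [PySem.Set.ofList_append_singleton, PySem.Set.add_of_mem hx,
            List.filter_append, h1, List.append_nil]
        exact ih
      · rw [PySem.Set.ofList_append_singleton, PySem.Set.add_of_not_mem hx,
            List.filter_append, List.filter_append, h1, List.append_nil, List.append_nil]
        exact ih

-- both ports compute the deduped B-names, A through the deduped tag list, B directly
theorem pv_ports_eq (iob2_ls : List (List (String × String))) :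
    listup_tag_name iob2_ls = listup_tag_name_alt iob2_ls := by
  unfold listup_tag_name listup_tag_name_alt
  rw [← List.foldl_flatten, ← List.foldl_flatten, pv_snd_fold,
      ← List.foldl_map (f := fun p : String × String => p.2)
        (g := fun d t => PySem.Dict.insert d t (1 : Int)),
      ← List.foldl_map (f := fun p : String × String => p.2)
        (g := fun d t => if pvTake2 t = "B-" then PySem.Dict.insert d (pvDrop2 t) (1 : Int) else d),
      PySem.Dict.keys_foldl_insert _ (fun _ _ => (1 : Int)),
      PySem.Dict.keys_empty, PySem.Set.update_nil_left,
      PySem.List.foldl_ite_eq_foldl_filter, PySem.List.foldl_ite_eq_foldl_filter,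
      PySem.Dict.keys_foldl_insert_key _ pvDrop2 (fun _ _ => (1 : Int)),
      PySem.Dict.keys_foldl_insert_key _ pvDrop2 (fun _ _ => (1 : Int)),
      PySem.Dict.keys_empty, PySem.Set.update_nil_left, PySem.Set.update_nil_left]
  exact pv_ofList_filter_map_ofList _ pvDrop2 _

-- ===== VERDICT (by name: the statement is the Claim_ definition above) =====
theorem listup_tag_name_spec : Claim_equal_listup_tag_name := by
  intro iob2_ls _ _
  unfold Spec_listup_tag_name
  exact pv_ports_eq iob2_ls
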